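-- pv_equiv track=rewrite | github.com/noorulameenkm/DataStructuresAlgorithms | Arrays/perfectPeak.py | perfectPeak4
-- ===== SOURCE A (Python) =====
-- def perfectPeak4(arr):
--     if len(arr) < 3:
--         return 0
--
--     m_left = arr[0]
--     m_right = arr[-1]
--
--     L = [False] * (len(arr) - 1)
--     for i in range(1, len(arr) - 1):
--         if arr[i] > m_left:
--             m_left = arr[i]
--             L[i] = True
--
--     for j in range(len(arr) - 2, 0, -1):
--         if arr[j] < m_right:
--             if L[j] == True:
--                 return 1
--
--             m_right = arr[j]
--
--     return 0
-- ===== SOURCE B (Python) =====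
-- def perfectPeak4(arr):
--     n = len(arr)
--     if n < 3:
--         return 0
--     cand = None
--     best = arr[0]
--     for i in range(1, n):
--         x = arr[i]
--         if cand is not None and x <= cand:
--             cand = None
--         if cand is None and x > best and i <= n - 2:
--             cand = x
--         if x > best:
--             best = x
--     return 0 if cand is None else 1
-- ===== Notes on version B (the rewrite author's own statement) =====
-- stated objective: alternative
-- what changed: Replaces A's two staged passes (a forward boolean flag table plus a backward early-return scan) with a single forward pass that keeps only a running prefix maximum and one surviving candidate value, killed as soon as a later element is not strictly larger; O(1) extra space instead of A's O(n) table.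
import Mathlib
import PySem

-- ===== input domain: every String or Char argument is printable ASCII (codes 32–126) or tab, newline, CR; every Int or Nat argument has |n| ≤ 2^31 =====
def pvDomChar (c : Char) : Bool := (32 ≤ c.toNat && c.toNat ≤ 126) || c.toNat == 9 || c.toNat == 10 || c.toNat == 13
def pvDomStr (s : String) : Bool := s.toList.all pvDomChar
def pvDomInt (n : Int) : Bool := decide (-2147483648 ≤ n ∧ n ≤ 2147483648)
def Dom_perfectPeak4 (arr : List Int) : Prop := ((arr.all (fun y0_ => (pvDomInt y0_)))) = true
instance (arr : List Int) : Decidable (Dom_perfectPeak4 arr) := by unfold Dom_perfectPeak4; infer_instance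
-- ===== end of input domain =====

-- B replaces A's boolean flag table + backward early-return scan with a single forward
-- pass holding one surviving candidate (killed when a later element is ≤ it) and a running
-- prefix maximum — O(1) extra space instead of A's O(n) table (objective: alternative).


-- ===== PORT A =====
-- first loop: for i in range(1, len(arr)-1): if arr[i] > m_left: m_left = arr[i]; L[i] = True
-- (all loop indices are in range, so List.getD is exact here)
def pAFill (arr : List Int) (n : Nat) (i : Nat) (mleft : Int) (L : List Bool) : List Bool :=
  if h : i < n - 1 then
    if arr.getD i 0 > mleft then
      pAFill arr n (i + 1) (arr.getD i 0) (L.set i true)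
    else
      pAFill arr n (i + 1) mleft L
  else L
termination_by n - 1 - i

-- second loop: for j in range(len(arr)-2, 0, -1): … (early return 1)
def pAScan (arr : List Int) (L : List Bool) (j : Nat) (mright : Int) : Int :=
  if j = 0 then 0
  else
    if arr.getD j 0 < mright then
      if L.getD j false = true then 1
      else pAScan arr L (j - 1) (arr.getD j 0)
    else pAScan arr L (j - 1) mright

def perfectPeak4 (arr : List Int) : Int :=
  if arr.length < 3 then 0
  else
    let mleft := arr.getD 0 0
    let mright := arr.getD (arr.length - 1) 0   -- arr[-1]
    let L := List.replicate (arr.length - 1) false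
    let L := pAFill arr arr.length 1 mleft L
    pAScan arr L (arr.length - 2) mright

-- ===== PORT B =====
-- one forward pass i = 1 .. n-1 with state (cand, best); transcription of Source B's loop body:
-- kill the candidate, possibly create a new one, update the running maximum
def bLoop (arr : List Int) (n : Nat) (i : Nat) (cand : Option Int) (best : Int) : Int :=
  if h : i < n then
    let x := arr.getD i 0
    let cand1 : Option Int :=
      match cand with
      | some v => if x ≤ v then none else some v
      | none => none
    let cand2 : Option Int :=
      if cand1 = none ∧ x > best ∧ i ≤ n - 2 then some x else cand1
    let best2 := if x > best then x else best
    bLoop arr n (i + 1) cand2 best2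
  else
    match cand with
    | none => 0
    | some _ => 1
termination_by n - i

def perfectPeak4_alt (arr : List Int) : Int :=
  if arr.length < 3 then 0
  else bLoop arr arr.length 1 none (arr.getD 0 0)

-- ===== PRECONDITION & SPEC =====
def Spec_perfectPeak4 (arr : List Int) (out : Int) : Prop := out = perfectPeak4_alt arr
instance (arr : List Int) (out : Int) : Decidable (Spec_perfectPeak4 arr out) := by unfold Spec_perfectPeak4; infer_instance

-- ===== CLAIM (what is proved, stated in full; the proofs are below) =====
def Claim_equal_perfectPeak4 : Prop := ∀ (arr : List Int), Dom_perfectPeak4 arr → Spec_perfectPeak4 arr (perfectPeak4 arr)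

-- ===== LEMMAS AND PROOFS =====

-- max / min of a nonempty list (the [] value 0 is never used with meaning)
def listMax : List Int → Int
  | [] => 0
  | [x] => x
  | x :: y :: ys => max x (listMax (y :: ys))

def listMin : List Int → Int
  | [] => 0
  | [x] => x
  | x :: y :: ys => min x (listMin (y :: ys))

-- the common specification: index k is a "perfect peak" position
def goodB (arr : List Int) (k : Nat) : Bool :=
  decide (listMax (arr.take k) < arr.getD k 0) && decide (arr.getD k 0 < listMin (arr.drop (k + 1)))

-- ∃ k ∈ [lo, hi], goodB arr k, as a Bool
def existsGoodB (arr : List Int) (lo hi : Nat) : Bool :=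
  (List.range' lo (hi + 1 - lo)).any (goodB arr)

-- "index c is a still-possible peak after the elements 0..m have been seen"
def aliveB (arr : List Int) (c m : Nat) : Prop :=
  1 ≤ c ∧ c + 2 ≤ arr.length ∧ c ≤ m ∧ listMax (arr.take c) < arr.getD c 0 ∧
    ∀ j < m + 1, c < j → arr.getD c 0 < arr.getD j 0

theorem existsGoodB_empty (arr : List Int) (lo hi : Nat) (h : hi + 1 ≤ lo) :
    existsGoodB arr lo hi = false := by
  unfold existsGoodB
  have : hi + 1 - lo = 0 := by omega
  rw [this]
  rfl

theorem existsGoodB_back (arr : List Int) (lo hi : Nat) (h : lo ≤ hi + 1) :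
    existsGoodB arr lo (hi + 1) = (existsGoodB arr lo hi || goodB arr (hi + 1)) := by
  unfold existsGoodB
  have e : hi + 1 + 1 - lo = (hi + 1 - lo) + 1 := by omega
  rw [e, List.range'_concat, List.any_append]
  have e2 : lo + 1 * (hi + 1 - lo) = hi + 1 := by omega
  rw [e2]
  simp [List.any_cons]

theorem listMax_cons (x : Int) (xs : List Int) (h : xs ≠ []) :
    listMax (x :: xs) = max x (listMax xs) := by
  cases xs with
  | nil => exact absurd rfl h
  | cons y ys => rfl

theorem listMin_cons (x : Int) (xs : List Int) (h : xs ≠ []) :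
    listMin (x :: xs) = min x (listMin xs) := by
  cases xs with
  | nil => exact absurd rfl h
  | cons y ys => rfl

theorem listMax_append_singleton (l : List Int) (a : Int) (h : l ≠ []) :
    listMax (l ++ [a]) = max (listMax l) a := by
  induction l with
  | nil => exact absurd rfl h
  | cons x xs ih =>
    cases xs with
    | nil => rfl
    | cons y ys =>
      have hne : (y :: ys : List Int) ++ [a] ≠ [] := by simp
      rw [List.cons_append, listMax_cons x _ hne, ih (by simp),
        listMax_cons x (y :: ys) (by simp), max_assoc]

theorem listMax_take_succ (l : List Int) (i : Nat) (h1 : 1 ≤ i) (h2 : i < l.length) :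
    listMax (l.take (i + 1)) = max (listMax (l.take i)) (l.getD i 0) := by
  rw [List.getD_eq_getElem l 0 h2]
  rw [List.take_add_one]
  have : l[i]? = some l[i] := List.getElem?_eq_getElem h2
  rw [this]
  simp only [Option.toList]
  refine listMax_append_singleton _ _ ?_
  apply List.ne_nil_of_length_pos
  rw [List.length_take]
  omega

theorem listMin_drop (l : List Int) (j : Nat) (h : j + 1 < l.length) :
    listMin (l.drop j) = min (l.getD j 0) (listMin (l.drop (j + 1))) := by
  rw [List.getD_eq_getElem l 0 (by omega)]
  rw [List.drop_eq_getElem_cons (by omega : j < l.length)]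
  refine listMin_cons _ _ ?_
  apply List.ne_nil_of_length_pos
  rw [List.length_drop]
  omega

theorem take_one_ne_nil (arr : List Int) (h : arr ≠ []) : arr.take 1 = [arr.getD 0 0] := by
  cases arr with
  | nil => exact absurd rfl h
  | cons x xs => simp

theorem listMin_drop_last (arr : List Int) (h : arr ≠ []) :
    listMin (arr.drop (arr.length - 1)) = arr.getD (arr.length - 1) 0 := by
  have hlen : 0 < arr.length := List.length_pos_iff.mpr h
  have h1 : arr.length - 1 < arr.length := by omega
  rw [List.drop_eq_getElem_cons h1]
  have : arr.length - 1 + 1 = arr.length := by omega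
  rw [this, List.drop_length, List.getD_eq_getElem arr 0 h1]
  rfl

theorem getD_set_ne (L : List Bool) (i k : Nat) (b : Bool) (h : i ≠ k) :
    (L.set i b).getD k false = L.getD k false := by
  rw [List.getD_eq_getElem?_getD, List.getD_eq_getElem?_getD, List.getElem?_set_ne h]

theorem getD_set_self (L : List Bool) (i : Nat) (b : Bool) (h : i < L.length) :
    (L.set i b).getD i false = b := by
  rw [List.getD_eq_getElem?_getD, List.getElem?_set_self h]
  rfl

theorem pAFill_getD (arr : List Int) (d : Nat) :
    ∀ i mleft L, arr.length - 1 - i ≤ d → 1 ≤ i →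
    mleft = listMax (arr.take i) → L.length = arr.length - 1 →
    (∀ k, k < arr.length - 1 → i ≤ k → L.getD k false = false) →
    ∀ k, 1 ≤ k → k < arr.length - 1 →
      (pAFill arr arr.length i mleft L).getD k false =
        (if k < i then L.getD k false else decide (listMax (arr.take k) < arr.getD k 0)) := by
  induction d with
  | zero =>
    intro i mleft L hd h1 hm hL hLow k hk1 hk2
    rw [pAFill]
    rw [dif_neg (by omega)]
    rw [if_pos (by omega)]
  | succ d ih =>
    intro i mleft L hd h1 hm hL hLow k hk1 hk2
    rw [pAFill]
    by_cases hi : i < arr.length - 1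
    · rw [dif_pos hi]
      have hiLen : i < arr.length := by omega
      have hmax : listMax (arr.take (i + 1)) = max (listMax (arr.take i)) (arr.getD i 0) :=
        listMax_take_succ arr i h1 hiLen
      by_cases hc : arr.getD i 0 > mleft
      · rw [if_pos hc]
        have hres := ih (i + 1) (arr.getD i 0) (L.set i true) (by omega) (by omega)
          (by rw [hmax, ← hm]; omega)
          (by simp [hL])
          (by
            intro k' hk' hik'
            rw [getD_set_ne _ _ _ _ (by omega)]
            exact hLow k' hk' (by omega))
          k hk1 hk2
        rw [hres]
        by_cases hki : k < i
        · rw [if_pos (by omega), if_pos hki, getD_set_ne _ _ _ _ (by omega)]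
        · by_cases hkeq : k = i
          · subst hkeq
            rw [if_pos (by omega), if_neg hki]
            rw [getD_set_self _ _ _ (by omega)]
            rw [← hm]
            symm
            rw [decide_eq_true_eq]
            exact hc
          · rw [if_neg (by omega), if_neg hki]
      · rw [if_neg hc]
        have hres := ih (i + 1) mleft L (by omega) (by omega)
          (by rw [hmax, ← hm]; omega)
          hL
          (by intro k' hk' hik'; exact hLow k' hk' (by omega))
          k hk1 hk2
        rw [hres]
        by_cases hki : k < i
        · rw [if_pos (by omega), if_pos hki]
        · by_cases hkeq : k = i
          · subst hkeq
            rw [if_pos (by omega), if_neg hki]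
            rw [hLow k hk2 (by omega), ← hm]
            symm
            rw [decide_eq_false_iff_not]
            exact hc
          · rw [if_neg (by omega), if_neg hki]
    · rw [dif_neg hi]
      rw [if_pos (by omega)]

theorem pAScan_spec (arr : List Int) (L : List Bool) (hn : 3 ≤ arr.length)
    (hL : ∀ k, 1 ≤ k → k < arr.length - 1 →
      L.getD k false = decide (listMax (arr.take k) < arr.getD k 0)) :
    ∀ j mright, j ≤ arr.length - 2 → mright = listMin (arr.drop (j + 1)) →
    pAScan arr L j mright = if existsGoodB arr 1 j then 1 else 0 := by
  intro j
  induction j with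
  | zero =>
    intro mright _ _
    rw [pAScan, if_pos rfl, existsGoodB_empty arr 1 0 (by omega)]
    rfl
  | succ j ih =>
    intro mright hj hm
    have e2 : j + 1 + 1 = j + 2 := rfl
    rw [e2] at hm
    have hdrop : listMin (arr.drop (j + 1)) =
        min (arr.getD (j + 1) 0) (listMin (arr.drop (j + 2))) :=
      listMin_drop arr (j + 1) (by omega)
    have hLj : L.getD (j + 1) false =
        decide (listMax (arr.take (j + 1)) < arr.getD (j + 1) 0) :=
      hL (j + 1) (by omega) (by omega)
    have hback : existsGoodB arr 1 (j + 1) = (existsGoodB arr 1 j || goodB arr (j + 1)) :=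
      existsGoodB_back arr 1 j (by omega)
    rw [pAScan, if_neg (by omega)]
    by_cases hlt : arr.getD (j + 1) 0 < mright
    · rw [if_pos hlt]
      rw [hm] at hlt
      by_cases hLv : L.getD (j + 1) false = true
      · rw [if_pos hLv]
        have hgood : goodB arr (j + 1) = true := by
          unfold goodB
          rw [hLj] at hLv
          simp only [Bool.and_eq_true, decide_eq_true_eq] at *
          exact ⟨hLv, hlt⟩
        rw [hback, hgood, Bool.or_true, if_pos rfl]
      · rw [if_neg hLv]
        have hng : goodB arr (j + 1) = false := by
          rw [hLj] at hLv
          have hP := Bool.eq_false_iff.mpr hLv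
          unfold goodB
          rw [hP, Bool.false_and]
        have hm' : arr.getD (j + 1) 0 = listMin (arr.drop (j + 1)) := by
          rw [hdrop]
          omega
        have := ih (arr.getD (j + 1) 0) (by omega) hm'
        simp only [Nat.add_sub_cancel] at this ⊢
        rw [this, hback, hng, Bool.or_false]
    · rw [if_neg hlt]
      rw [hm] at hlt
      have hng : goodB arr (j + 1) = false := by
        unfold goodB
        simp only [Bool.and_eq_false_iff, decide_eq_false_iff_not]
        right
        omega
      have hm' : mright = listMin (arr.drop (j + 1)) := by
        rw [hdrop, hm]
        omega
      have := ih mright (by omega) hm'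
      simp only [Nat.add_sub_cancel] at this ⊢
      rw [this, hback, hng, Bool.or_false]

-- elements of a prefix are bounded by its listMax
theorem le_listMax (l : List Int) (j : Nat) (hj : j < l.length) :
    l.getD j 0 ≤ listMax l := by
  induction l generalizing j with
  | nil => simp at hj
  | cons x xs ih =>
    cases xs with
    | nil =>
      cases j with
      | zero => simp [listMax, List.getD]
      | succ j => simp at hj
    | cons y ys =>
      rw [listMax_cons x (y :: ys) (by simp)]
      cases j with
      | zero => simp [List.getD]
      | succ j =>
        have := ih j (by simpa using hj)
        simp only [List.getD_cons_succ]
        exact le_trans this (le_max_right _ _)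

theorem getD_take (l : List Int) (k j : Nat) (h : j < k) :
    (l.take k).getD j 0 = l.getD j 0 := by
  rw [List.getD_eq_getElem?_getD, List.getD_eq_getElem?_getD, List.getElem?_take_of_lt h]

-- an earlier alive index carries a strictly smaller value
theorem alive_lt_of_lt (arr : List Int) (m c k : Nat)
    (hc : aliveB arr c m) (hk : aliveB arr k m) (h : c < k) :
    arr.getD c 0 < arr.getD k 0 := by
  obtain ⟨_, hcl, _, _, _⟩ := hc
  obtain ⟨_, _, _, hkmax, _⟩ := hk
  have h1 : (arr.take k).getD c 0 ≤ listMax (arr.take k) := by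
    apply le_listMax
    rw [List.length_take]
    omega
  rw [getD_take arr k c h] at h1
  omega

theorem alive_step_up (arr : List Int) (c i : Nat) (hi : 1 ≤ i)
    (h : aliveB arr c (i - 1)) (hx : arr.getD c 0 < arr.getD i 0) : aliveB arr c i := by
  obtain ⟨h1, h2, h3, h4, h5⟩ := h
  refine ⟨h1, h2, by omega, h4, ?_⟩
  intro j hj hcj
  by_cases hji : j = i
  · subst hji; exact hx
  · exact h5 j (by omega) hcj

theorem alive_step_down (arr : List Int) (c i : Nat) (hi : 1 ≤ i)
    (h : aliveB arr c i) (hci : c < i) :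
    aliveB arr c (i - 1) ∧ arr.getD c 0 < arr.getD i 0 := by
  obtain ⟨h1, h2, h3, h4, h5⟩ := h
  exact ⟨⟨h1, h2, by omega, h4, fun j hj hcj => h5 j (by omega) hcj⟩,
    h5 i (by omega) hci⟩

theorem alive_self (arr : List Int) (i : Nat) (h1 : 1 ≤ i) (h2 : i + 2 ≤ arr.length)
    (h3 : listMax (arr.take i) < arr.getD i 0) : aliveB arr i i :=
  ⟨h1, h2, le_rfl, h3, fun j hj hij => by omega⟩

theorem alive_at_self_iff (arr : List Int) (i : Nat) (h1 : 1 ≤ i) :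
    aliveB arr i i ↔ (i + 2 ≤ arr.length ∧ listMax (arr.take i) < arr.getD i 0) := by
  constructor
  · rintro ⟨_, h2, _, h4, _⟩; exact ⟨h2, h4⟩
  · rintro ⟨h2, h4⟩; exact alive_self arr i h1 h2 h4

-- the kill step of Source B's loop body, named for the proofs (definitionally the port's match)
def killStep (x : Int) (cand : Option Int) : Option Int :=
  match cand with
  | some v => if x ≤ v then none else some v
  | none => none

-- terminal state of the one-pass loop
theorem bLoop_end (arr : List Int) (cand : Option Int) (best : Int)
    (hnone : cand = none → ∀ c, ¬ aliveB arr c (arr.length - 1))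
    (hsome : ∀ v, cand = some v → ∃ c, aliveB arr c (arr.length - 1)) :
    ((∃ c, aliveB arr c (arr.length - 1)) →
      bLoop arr arr.length arr.length cand best = 1) ∧
    ((¬ ∃ c, aliveB arr c (arr.length - 1)) →
      bLoop arr arr.length arr.length cand best = 0) := by
  rw [bLoop.eq_def, dif_neg (lt_irrefl _)]
  cases cand with
  | none =>
    constructor
    · intro ⟨c, hc⟩
      exact absurd hc (hnone rfl c)
    · intro _; rfl
  | some v =>
    constructor
    · intro _; rfl
    · intro hno
      exact absurd (hsome v rfl) hno

-- the one-pass loop returns 1 iff some index is still alive after the whole array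
theorem bLoop_run (arr : List Int) (hn : 3 ≤ arr.length) (d : Nat) :
    ∀ i cand best, arr.length - i ≤ d → 1 ≤ i → i ≤ arr.length →
    best = listMax (arr.take i) →
    (cand = none → ∀ c, ¬ aliveB arr c (i - 1)) →
    (∀ v, cand = some v → ∃ c, aliveB arr c (i - 1) ∧ v = arr.getD c 0 ∧
      ∀ k, aliveB arr k (i - 1) → c ≤ k) →
    ((∃ c, aliveB arr c (arr.length - 1)) → bLoop arr arr.length i cand best = 1) ∧
    ((¬ ∃ c, aliveB arr c (arr.length - 1)) → bLoop arr arr.length i cand best = 0) := by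
  induction d with
  | zero =>
    intro i cand best hd h1 hle hbest hnone hsome
    have hi : i = arr.length := by omega
    subst hi
    exact bLoop_end arr cand best hnone
      (fun v hv => (hsome v hv).elim (fun c hc => ⟨c, hc.1⟩))
  | succ d ih =>
    intro i cand best hd h1 hle hbest hnone hsome
    by_cases hi : i < arr.length
    · set x := arr.getD i 0 with hxdef
      have hstep : bLoop arr arr.length i cand best =
          bLoop arr arr.length (i + 1)
            (if (killStep x cand = none) ∧ x > best ∧ i ≤ arr.length - 2
              then some x
              else killStep x cand)
            (if x > best then x else best) := by
        rw [bLoop.eq_def]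
        rw [dif_pos hi]
        cases cand <;> rfl
      rw [hstep]
      -- characterize alive-at-i
      have hchar_lt : ∀ c, c < i → (aliveB arr c i ↔ aliveB arr c (i - 1) ∧ arr.getD c 0 < x) := by
        intro c hci
        constructor
        · intro h; exact alive_step_down arr c i h1 h hci
        · intro ⟨h, hx⟩; exact alive_step_up arr c i h1 h hx
      have hchar_gt : ∀ c, i < c → ¬ aliveB arr c i := by
        intro c hci ⟨_, _, h3, _, _⟩; omega
      have hbest2 : (if x > best then x else best) = listMax (arr.take (i + 1)) := by
        rw [listMax_take_succ arr i h1 hi, ← hbest, ← hxdef]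
        by_cases hxb : x > best
        · rw [if_pos hxb]; omega
        · rw [if_neg hxb]; omega
      -- the candidate after the kill step
      have hkill :
          (killStep x cand = none →
            ∀ c, c < i → ¬ aliveB arr c i) ∧
          (∀ v, killStep x cand = some v →
            ∃ c, aliveB arr c i ∧ v = arr.getD c 0 ∧
              ∀ k, aliveB arr k i → c ≤ k) := by
        cases cand with
        | none =>
          simp only [killStep]
          refine ⟨?_, by intro v h; exact absurd h (by simp)⟩
          intro _ c hci hal
          exact hnone rfl c ((hchar_lt c hci).mp hal).1
        | some v =>
          obtain ⟨c0, hc0, hv, hmin⟩ := hsome v rfl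
          simp only [killStep]
          by_cases hxv : x ≤ v
          · simp only [if_pos hxv]
            refine ⟨?_, by intro v' h; exact absurd h (by simp)⟩
            intro _ c hci hal
            obtain ⟨hal', hlt⟩ := (hchar_lt c hci).mp hal
            have hcc0 : c0 ≤ c := hmin c hal'
            by_cases hce : c = c0
            · subst hce; rw [← hv] at hlt; omega
            · have := alive_lt_of_lt arr (i - 1) c0 c hc0 hal' (by omega)
              rw [← hv] at this; omega
          · simp only [if_neg hxv]
            refine ⟨by intro h; exact absurd h (by simp), ?_⟩
            intro v' hv'
            have hvv : v' = v := (Option.some.inj hv').symm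
            subst hvv
            have hc0i : aliveB arr c0 i :=
              alive_step_up arr c0 i h1 hc0 (by rw [← hv, ← hxdef]; omega)
            refine ⟨c0, hc0i, hv, ?_⟩
            intro k hk
            by_cases hki : k < i
            · exact hmin k ((hchar_lt k hki).mp hk).1
            · have : ¬ i < k := fun h => hchar_gt k h hk
              have hc0le : c0 ≤ i - 1 := hc0.2.2.1
              omega
      obtain ⟨hk_none, hk_some⟩ := hkill
      -- now the birth step and recursion
      by_cases hbirth : (killStep x cand = none) ∧ x > best ∧ i ≤ arr.length - 2
      · rw [if_pos hbirth]
        obtain ⟨hcn, hxb, hint⟩ := hbirth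
        have hai : aliveB arr i i := by
          refine alive_self arr i h1 (by omega) ?_
          rw [← hbest, ← hxdef]; exact hxb
        refine ih (i + 1) (some x) _ (by omega) (by omega) (by omega) hbest2
          (by intro h; exact absurd h (by simp)) ?_
        intro v hv
        have hvv : v = x := Option.some.inj hv.symm
        subst hvv
        have e : i + 1 - 1 = i := by omega
        rw [e]
        refine ⟨i, hai, hxdef, ?_⟩
        intro k hk
        by_cases hki : k < i
        · exact absurd hk (hk_none hcn k hki)
        · omega
      · rw [if_neg hbirth]
        refine ih (i + 1) _ _ (by omega) (by omega) (by omega) hbest2 ?_ ?_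
        · intro hcn c
          have e : i + 1 - 1 = i := by omega
          rw [e]
          intro hal
          by_cases hki : c < i
          · exact hk_none hcn c hki hal
          · by_cases hce : c = i
            · subst hce
              have := (alive_at_self_iff arr c h1).mp hal
              rw [← hbest] at this
              exact hbirth ⟨hcn, this.2, by omega⟩
            · exact hchar_gt c (by omega) hal
        · intro v hv
          have e : i + 1 - 1 = i := by omega
          rw [e]
          exact hk_some v hv
    · have hieq : i = arr.length := by omega
      subst hieq
      exact bLoop_end arr cand best hnone
        (fun v hv => (hsome v hv).elim (fun c hc => ⟨c, hc.1⟩))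

-- v below the minimum of a nonempty list ↔ below every element
theorem lt_listMin_iff (l : List Int) (h : l ≠ []) (v : Int) :
    v < listMin l ↔ ∀ j < l.length, v < l.getD j 0 := by
  induction l with
  | nil => exact absurd rfl h
  | cons x xs ih =>
    cases xs with
    | nil =>
      simp only [listMin, List.length_cons, List.length_nil]
      constructor
      · intro hv j hj
        cases j with
        | zero => simpa using hv
        | succ j => omega
      · intro hall; simpa using hall 0 (by omega)
    | cons y ys =>
      rw [listMin_cons x (y :: ys) (by simp), lt_min_iff, ih (by simp)]
      constructor
      · intro ⟨hx, hrest⟩ j hj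
        cases j with
        | zero => simpa using hx
        | succ j =>
          have := hrest j (by simpa using hj)
          simpa using this
      · intro hall
        refine ⟨by simpa using hall 0 (by simp), ?_⟩
        intro j hj
        have := hall (j + 1) (by simpa using hj)
        simpa using this

theorem getD_drop (l : List Int) (m t : Nat) :
    (l.drop m).getD t 0 = l.getD (m + t) 0 := by
  rw [List.getD_eq_getElem?_getD, List.getD_eq_getElem?_getD, List.getElem?_drop]

-- bridge: the good-index predicate coincides with survival after the full array
theorem good_iff_alive (arr : List Int) (hn : 3 ≤ arr.length) (k : Nat)
    (h1 : 1 ≤ k) (h2 : k ≤ arr.length - 2) :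
    goodB arr k = true ↔ aliveB arr k (arr.length - 1) := by
  have hdropne : arr.drop (k + 1) ≠ [] := by
    apply List.ne_nil_of_length_pos
    rw [List.length_drop]
    omega
  have hdlen : (arr.drop (k + 1)).length = arr.length - (k + 1) := List.length_drop ..
  unfold goodB aliveB
  simp only [Bool.and_eq_true, decide_eq_true_eq]
  constructor
  · intro ⟨hA, hB⟩
    refine ⟨h1, by omega, by omega, hA, ?_⟩
    intro j hj hkj
    have := (lt_listMin_iff _ hdropne _).mp hB (j - (k + 1)) (by omega)
    rw [getD_drop] at this
    have e : k + 1 + (j - (k + 1)) = j := by omega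
    rwa [e] at this
  · intro ⟨_, _, _, hA, hall⟩
    refine ⟨hA, ?_⟩
    rw [lt_listMin_iff _ hdropne _]
    intro t ht
    rw [getD_drop]
    exact hall (k + 1 + t) (by omega) (by omega)

theorem existsGood_iff_alive (arr : List Int) (hn : 3 ≤ arr.length) :
    existsGoodB arr 1 (arr.length - 2) = true ↔ ∃ c, aliveB arr c (arr.length - 1) := by
  unfold existsGoodB
  rw [List.any_eq_true]
  constructor
  · intro ⟨k, hk, hgk⟩
    rw [List.mem_range'_1] at hk
    obtain ⟨hk1, hk2⟩ := hk
    refine ⟨k, (good_iff_alive arr hn k hk1 (by omega)).mp hgk⟩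
  · intro ⟨c, hc⟩
    have h1 : 1 ≤ c := hc.1
    have h2 : c + 2 ≤ arr.length := hc.2.1
    refine ⟨c, ?_, (good_iff_alive arr hn c h1 (by omega)).mpr hc⟩
    rw [List.mem_range'_1]
    omega

-- ===== VERDICT (by name: the statement is the Claim_ definition above) =====
theorem perfectPeak4_spec : Claim_equal_perfectPeak4 := by
  intro arr _
  unfold Spec_perfectPeak4 perfectPeak4 perfectPeak4_alt
  by_cases hn : arr.length < 3
  · rw [if_pos hn, if_pos hn]
  · rw [if_neg hn, if_neg hn]
    simp only [not_lt] at hn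
    have hne : arr ≠ [] := by
      intro hc; subst hc; simp at hn
    have htake1 : arr.getD 0 0 = listMax (arr.take 1) := by
      rw [take_one_ne_nil arr hne]; rfl
    have hLprop : ∀ k, 1 ≤ k → k < arr.length - 1 →
        (pAFill arr arr.length 1 (arr.getD 0 0)
          (List.replicate (arr.length - 1) false)).getD k false =
          decide (listMax (arr.take k) < arr.getD k 0) := by
      intro k hk1 hk2
      have := pAFill_getD arr (arr.length) 1 (arr.getD 0 0)
        (List.replicate (arr.length - 1) false) (by omega) le_rfl htake1
        (by simp)
        (by intro k' hk' _; rw [List.getD_replicate _ (by omega)])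
        k hk1 hk2
      rw [this, if_neg (by omega)]
    have hmr : arr.getD (arr.length - 1) 0 = listMin (arr.drop (arr.length - 2 + 1)) := by
      have e : arr.length - 2 + 1 = arr.length - 1 := by omega
      rw [e, listMin_drop_last arr hne]
    rw [pAScan_spec arr _ hn hLprop (arr.length - 2) _ le_rfl hmr]
    have hrun := bLoop_run arr hn arr.length 1 none (arr.getD 0 0) (by omega) le_rfl
      (by omega) htake1
      (by intro _ c ⟨_, _, h3, _, _⟩; omega)
      (by intro v h; exact absurd h (by simp))
    by_cases hex : ∃ c, aliveB arr c (arr.length - 1)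
    · rw [hrun.1 hex, if_pos ((existsGood_iff_alive arr hn).mpr hex)]
    · rw [hrun.2 hex]
      have : existsGoodB arr 1 (arr.length - 2) ≠ true := by
        intro h; exact hex ((existsGood_iff_alive arr hn).mp h)
      rw [if_neg this]
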